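-- pv_equiv track=rewrite | github.com/DeepakBonagiri04/Career-Pathway-Recommender-Using-AI | logic/mapper.py | map_to_careers
-- ===== SOURCE A (Python) =====
-- def map_to_careers(interests, hobbies, scores):
--     interests = interests.lower()
--     hobbies = hobbies.lower()
--     scores = scores.lower()
--
--     career_matches = []
--
--     # STEM
--     if any(sub in interests for sub in ["math", "physics", "chemistry", "biology", "computer", "engineering"]):
--         career_matches.append("STEM")
--
--     # Arts
--     if any(sub in hobbies for sub in ["drawing", "painting", "music", "acting", "design"]):
--         career_matches.append("Arts")
--
--     # Sports
--     if "sports" in hobbies or "cricket" in hobbies or "football" in hobbies: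
--         career_matches.append("Sports")
--
--     # Commerce
--     if any(sub in interests for sub in ["economics", "business", "accounts", "finance"]):
--         career_matches.append("Commerce")
--
--     # Social Sciences
--     if any(sub in interests for sub in ["history", "psychology", "geography", "political"]):
--         career_matches.append("Social Science")
--
--     # Vocational
--     if any(sub in hobbies for sub in ["cooking", "crafting", "repair", "mechanic"]):
--         career_matches.append("Vocational")
--
--     # Default fallback
--     if not career_matches:
--         career_matches.append("General")
--
--     return list(set(career_matches))[:3]
-- ===== SOURCE B (Python) =====
-- # Different algorithm: a single-pass multi-pattern position scanner. Instead of running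
-- # one substring search per keyword per category, B walks every position of each lowered
-- # text once and asks which keywords START there (a naive Aho-Corasick-style scan over a
-- # keyword -> category map), collects the hit categories, and emits them in canonical
-- # rule order with the same 'General' fallback and [:3] cap.
-- INTEREST_KW = {"math": "STEM", "physics": "STEM", "chemistry": "STEM", "biology": "STEM",
--                "computer": "STEM", "engineering": "STEM",
--                "economics": "Commerce", "business": "Commerce", "accounts": "Commerce",
--                "finance": "Commerce",
--                "history": "Social Science", "psychology": "Social Science",
--                "geography": "Social Science", "political": "Social Science"}
-- HOBBY_KW = {"drawing": "Arts", "painting": "Arts", "music": "Arts", "acting": "Arts",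
--             "design": "Arts",
--             "sports": "Sports", "cricket": "Sports", "football": "Sports",
--             "cooking": "Vocational", "crafting": "Vocational", "repair": "Vocational",
--             "mechanic": "Vocational"}
-- ORDER = ["STEM", "Arts", "Sports", "Commerce", "Social Science", "Vocational"]
--
-- def map_to_careers(interests, hobbies, scores):
--     hits = [cat
--             for text, table in ((interests.lower(), INTEREST_KW), (hobbies.lower(), HOBBY_KW))
--             for i in range(len(text))
--             for kw, cat in table.items()
--             if text.startswith(kw, i)]
--     matched = [c for c in ORDER if c in hits]
--     return (matched or ["General"])[:3]
-- ===== Notes on version B (the rewrite author's own statement) =====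
-- stated objective: alternative
-- what changed: Replaces the six per-category any(keyword in text) substring searches by a single-pass multi-pattern scanner: one walk over each lowered text's positions asking which keywords of a keyword->category map start there, collecting hit categories and emitting them in canonical rule order, dropping the list(set(...)) round-trip.
import Mathlib
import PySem

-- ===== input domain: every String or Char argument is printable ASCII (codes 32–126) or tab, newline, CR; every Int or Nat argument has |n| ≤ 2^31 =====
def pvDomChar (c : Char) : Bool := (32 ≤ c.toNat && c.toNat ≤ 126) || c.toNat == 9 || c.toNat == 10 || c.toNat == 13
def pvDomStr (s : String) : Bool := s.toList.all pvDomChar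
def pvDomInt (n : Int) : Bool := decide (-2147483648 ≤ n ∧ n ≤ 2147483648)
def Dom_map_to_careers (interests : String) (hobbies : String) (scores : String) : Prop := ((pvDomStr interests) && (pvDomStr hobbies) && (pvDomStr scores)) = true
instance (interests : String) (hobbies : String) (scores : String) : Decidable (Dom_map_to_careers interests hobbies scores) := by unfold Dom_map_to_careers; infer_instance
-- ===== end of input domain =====

-- B replaces A's per-category any(keyword in text) substring searches by a single-pass
-- position scanner over a keyword→category table, emitting hit categories in canonical
-- rule order (objective: alternative).

-- ===== PORT A =====
def map_to_careers (interests : String) (hobbies : String) (scores : String) : List String :=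
  let interests := PySem.Str.lower interests
  let hobbies := PySem.Str.lower hobbies
  let _scores := PySem.Str.lower scores
  let career_matches : List String := []
  let career_matches := if (["math", "physics", "chemistry", "biology", "computer", "engineering"] : List String).any (fun sub => PySem.Str.isIn sub interests) then career_matches ++ ["STEM"] else career_matches
  let career_matches := if (["drawing", "painting", "music", "acting", "design"] : List String).any (fun sub => PySem.Str.isIn sub hobbies) then career_matches ++ ["Arts"] else career_matches
  let career_matches := if PySem.Str.isIn "sports" hobbies || PySem.Str.isIn "cricket" hobbies || PySem.Str.isIn "football" hobbies then career_matches ++ ["Sports"] else career_matches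
  let career_matches := if (["economics", "business", "accounts", "finance"] : List String).any (fun sub => PySem.Str.isIn sub interests) then career_matches ++ ["Commerce"] else career_matches
  let career_matches := if (["history", "psychology", "geography", "political"] : List String).any (fun sub => PySem.Str.isIn sub interests) then career_matches ++ ["Social Science"] else career_matches
  let career_matches := if (["cooking", "crafting", "repair", "mechanic"] : List String).any (fun sub => PySem.Str.isIn sub hobbies) then career_matches ++ ["Vocational"] else career_matches
  let career_matches := if career_matches = [] then career_matches ++ ["General"] else career_matches
  -- list(set(career_matches))[:3]: CPython iterates the set in hash order; the port keeps
  -- insertion order (exact as a SET under Pre_, which bounds the matches by 3)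
  (PySem.Set.ofList career_matches).take 3

-- ===== PORT B =====
def pvInterestKW : List (String × String) :=
  [("math", "STEM"), ("physics", "STEM"), ("chemistry", "STEM"), ("biology", "STEM"),
   ("computer", "STEM"), ("engineering", "STEM"),
   ("economics", "Commerce"), ("business", "Commerce"), ("accounts", "Commerce"),
   ("finance", "Commerce"),
   ("history", "Social Science"), ("psychology", "Social Science"),
   ("geography", "Social Science"), ("political", "Social Science")]

def pvHobbyKW : List (String × String) :=
  [("drawing", "Arts"), ("painting", "Arts"), ("music", "Arts"), ("acting", "Arts"),
   ("design", "Arts"),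
   ("sports", "Sports"), ("cricket", "Sports"), ("football", "Sports"),
   ("cooking", "Vocational"), ("crafting", "Vocational"), ("repair", "Vocational"),
   ("mechanic", "Vocational")]

def pvOrder : List String := ["STEM", "Arts", "Sports", "Commerce", "Social Science", "Vocational"]

-- text.startswith(kw, i) for 0 ≤ i ≤ len(text) is exactly PySem.Chars.startswith on (toList).drop i
def map_to_careers_alt (interests : String) (hobbies : String) (scores : String) : List String :=
  let hits : List String :=
    ([((PySem.Str.lower interests).toList, pvInterestKW), ((PySem.Str.lower hobbies).toList, pvHobbyKW)]
      : List (List Char × List (String × String))).flatMap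
      (fun p => (List.range p.1.length).flatMap
        (fun i => (p.2.filter (fun kc => PySem.Chars.startswith (p.1.drop i) kc.1.toList)).map
          (fun kc => kc.2)))
  let matched := pvOrder.filter (fun c => hits.contains c)
  (if matched = [] then ["General"] else matched).take 3

-- ===== PRECONDITION & SPEC =====
-- Pre_ excludes inputs where MORE THAN THREE category keyword groups match: there A's
-- [:3] keeps an arbitrary hash-ordered 3-element subset of the matched set, a value no
-- one would specify (the categories kept differ from run to run).
def Pre_map_to_careers (interests : String) (hobbies : String) (scores : String) : Prop :=
  (([(["math", "physics", "chemistry", "biology", "computer", "engineering"] : List String).any (fun sub => PySem.Str.isIn sub (PySem.Str.lower interests)),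
     (["drawing", "painting", "music", "acting", "design"] : List String).any (fun sub => PySem.Str.isIn sub (PySem.Str.lower hobbies)),
     (["sports", "cricket", "football"] : List String).any (fun sub => PySem.Str.isIn sub (PySem.Str.lower hobbies)),
     (["economics", "business", "accounts", "finance"] : List String).any (fun sub => PySem.Str.isIn sub (PySem.Str.lower interests)),
     (["history", "psychology", "geography", "political"] : List String).any (fun sub => PySem.Str.isIn sub (PySem.Str.lower interests)),
     (["cooking", "crafting", "repair", "mechanic"] : List String).any (fun sub => PySem.Str.isIn sub (PySem.Str.lower hobbies))]).count true) ≤ 3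
instance (interests : String) (hobbies : String) (scores : String) : Decidable (Pre_map_to_careers interests hobbies scores) := by unfold Pre_map_to_careers; infer_instance

def pvWitness_map_to_careers : String × String × String := ("I like Math and history", "music", "")

def Spec_map_to_careers (interests : String) (hobbies : String) (scores : String) (out : List String) : Prop := out = map_to_careers_alt interests hobbies scores
instance (interests : String) (hobbies : String) (scores : String) (out : List String) : Decidable (Spec_map_to_careers interests hobbies scores out) := by unfold Spec_map_to_careers; infer_instance

-- ===== CLAIM (what is proved, stated in full; the proofs are below) =====
def Claim_equal_map_to_careers : Prop := ∀ (interests : String) (hobbies : String) (scores : String), Dom_map_to_careers interests hobbies scores → Pre_map_to_careers interests hobbies scores → Spec_map_to_careers interests hobbies scores (map_to_careers interests hobbies scores)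

-- ===== LEMMAS AND PROOFS =====

-- membership in one text's position scan = an isIn-style substring hit of some table entry
lemma pv_mem_scan_iff (t : List Char) (table : List (String × String)) (c : String)
    (hne : ∀ kc ∈ table, kc.1.toList ≠ []) :
    (c ∈ (List.range t.length).flatMap
      (fun i => (table.filter (fun kc => PySem.Chars.startswith (t.drop i) kc.1.toList)).map
        (fun kc => kc.2)))
    ↔ ∃ kc ∈ table, kc.2 = c ∧ PySem.Chars.isIn kc.1.toList t = true := by
  simp only [List.mem_flatMap, List.mem_map, List.mem_filter, List.mem_range]
  constructor
  · rintro ⟨i, hi, kc, ⟨hmem, hpre⟩, rfl⟩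
    exact ⟨kc, hmem, rfl,
      (PySem.Chars.exists_prefix_drop_iff_isIn _ _).mp
        ⟨i, (PySem.Chars.startswith_iff _ _).mp hpre⟩⟩
  · rintro ⟨kc, hmem, rfl, hin⟩
    obtain ⟨j, hj⟩ := (PySem.Chars.exists_prefix_drop_iff_isIn _ _).mpr hin
    have hjlt : j < t.length := by
      by_contra h
      have hdrop : t.drop j = [] := List.drop_eq_nil_of_le (le_of_not_gt h)
      exact hne kc hmem (List.prefix_nil.mp (hdrop ▸ hj))
    exact ⟨j, hjlt, kc, ⟨hmem, (PySem.Chars.startswith_iff _ _).mpr hj⟩, rfl⟩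

-- contains on one text's scan, as a boolean over the table (cited in the main proof)
lemma pv_scan_contains (t : List Char) (table : List (String × String)) (c : String)
    (hne : ∀ kc ∈ table, kc.1.toList ≠ []) :
    ((List.range t.length).flatMap
      (fun i => (table.filter (fun kc => PySem.Chars.startswith (t.drop i) kc.1.toList)).map
        (fun kc => kc.2))).contains c
    = table.any (fun kc => kc.2 == c && PySem.Chars.isIn kc.1.toList t) := by
  rw [Bool.eq_iff_iff]
  rw [List.contains_iff_mem, pv_mem_scan_iff t table c hne]
  simp only [List.any_eq_true, Bool.and_eq_true, beq_iff_eq]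

set_option maxHeartbeats 2000000 in
theorem map_to_careers_spec : Claim_equal_map_to_careers := by
  intro interests hobbies scores _ hpre
  clear hpre
  unfold Spec_map_to_careers map_to_careers map_to_careers_alt
  dsimp only
  rw [show (PySem.Str.isIn "sports" (PySem.Str.lower hobbies) || PySem.Str.isIn "cricket" (PySem.Str.lower hobbies) || PySem.Str.isIn "football" (PySem.Str.lower hobbies)) = ((["sports", "cricket", "football"] : List String).any (fun sub => PySem.Str.isIn sub (PySem.Str.lower hobbies))) by simp [Bool.or_assoc]]
  have hIne : ∀ kc ∈ pvInterestKW, kc.1.toList ≠ [] := by decide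
  have hHne : ∀ kc ∈ pvHobbyKW, kc.1.toList ≠ [] := by decide
  have eI := fun c => pv_scan_contains (PySem.Str.lower interests).toList pvInterestKW c hIne
  have eH := fun c => pv_scan_contains (PySem.Str.lower hobbies).toList pvHobbyKW c hHne
  simp only [List.flatMap_cons, List.flatMap_nil, List.append_nil, List.contains_append, eI, eH]
  simp only [pvInterestKW, pvHobbyKW, pvOrder, List.filter, List.any_cons, List.any_nil,
    PySem.Str.isIn_eq, String.reduceBEq, beq_self_eq_true, Bool.true_and, Bool.false_and,
    Bool.or_false, Bool.false_or]
  generalize (PySem.Chars.isIn "math".toList (PySem.Str.lower interests).toList || (PySem.Chars.isIn "physics".toList (PySem.Str.lower interests).toList || (PySem.Chars.isIn "chemistry".toList (PySem.Str.lower interests).toList || (PySem.Chars.isIn "biology".toList (PySem.Str.lower interests).toList || (PySem.Chars.isIn "computer".toList (PySem.Str.lower interests).toList || PySem.Chars.isIn "engineering".toList (PySem.Str.lower interests).toList))))) = b1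
  generalize (PySem.Chars.isIn "drawing".toList (PySem.Str.lower hobbies).toList || (PySem.Chars.isIn "painting".toList (PySem.Str.lower hobbies).toList || (PySem.Chars.isIn "music".toList (PySem.Str.lower hobbies).toList || (PySem.Chars.isIn "acting".toList (PySem.Str.lower hobbies).toList || PySem.Chars.isIn "design".toList (PySem.Str.lower hobbies).toList)))) = b2
  generalize (PySem.Chars.isIn "sports".toList (PySem.Str.lower hobbies).toList || (PySem.Chars.isIn "cricket".toList (PySem.Str.lower hobbies).toList || PySem.Chars.isIn "football".toList (PySem.Str.lower hobbies).toList)) = b3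
  generalize (PySem.Chars.isIn "economics".toList (PySem.Str.lower interests).toList || (PySem.Chars.isIn "business".toList (PySem.Str.lower interests).toList || (PySem.Chars.isIn "accounts".toList (PySem.Str.lower interests).toList || PySem.Chars.isIn "finance".toList (PySem.Str.lower interests).toList))) = b4
  generalize (PySem.Chars.isIn "history".toList (PySem.Str.lower interests).toList || (PySem.Chars.isIn "psychology".toList (PySem.Str.lower interests).toList || (PySem.Chars.isIn "geography".toList (PySem.Str.lower interests).toList || PySem.Chars.isIn "political".toList (PySem.Str.lower interests).toList))) = b5
  generalize (PySem.Chars.isIn "cooking".toList (PySem.Str.lower hobbies).toList || (PySem.Chars.isIn "crafting".toList (PySem.Str.lower hobbies).toList || (PySem.Chars.isIn "repair".toList (PySem.Str.lower hobbies).toList || PySem.Chars.isIn "mechanic".toList (PySem.Str.lower hobbies).toList))) = b6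
  cases b1 <;> cases b2 <;> cases b3 <;> cases b4 <;> cases b5 <;> cases b6 <;> decide
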